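-- pv_equiv track=rewrite | github.com/mrtazz/dotfiles | config/offlineimap/lib.py | mycmp
-- ===== SOURCE A (Python) =====
-- prioritized = ['INBOX']
--
-- def cmp(a, b):
--     return (a > b) - (a < b)
--
-- def mycmp(x, y):
--     for prefix in prioritized:
--         xsw = x.startswith(prefix)
--         ysw = y.startswith(prefix)
--         if xsw and ysw:
--             return cmp(x, y)
--         elif xsw:
--             return -1
--         elif ysw:
--             return +1
--     return cmp(x, y)
-- ===== SOURCE B (Python) =====
-- def mycmp(x, y):
--     # Decorate each string with a one-char priority tag, then decide by a single
--     # left-to-right character scan (no branch cascade, no builtin comparison).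
--     def tag(s):
--         return ('\x00' if s.startswith('INBOX') else '\x01') + s
--     a, b = tag(x), tag(y)
--     for ca, cb in zip(a, b):
--         if ca != cb:
--             return -1 if ca < cb else 1
--     return (len(a) > len(b)) - (len(a) < len(b))
-- ===== Notes on version B (the rewrite author's own statement) =====
-- stated objective: alternative
-- what changed: Instead of A's startswith branch cascade plus the builtin three-way string comparison, B prepends a one-character priority tag to each string and decides the result by a single hand-rolled left-to-right character scan with a length fallback.
import Mathlib
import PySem

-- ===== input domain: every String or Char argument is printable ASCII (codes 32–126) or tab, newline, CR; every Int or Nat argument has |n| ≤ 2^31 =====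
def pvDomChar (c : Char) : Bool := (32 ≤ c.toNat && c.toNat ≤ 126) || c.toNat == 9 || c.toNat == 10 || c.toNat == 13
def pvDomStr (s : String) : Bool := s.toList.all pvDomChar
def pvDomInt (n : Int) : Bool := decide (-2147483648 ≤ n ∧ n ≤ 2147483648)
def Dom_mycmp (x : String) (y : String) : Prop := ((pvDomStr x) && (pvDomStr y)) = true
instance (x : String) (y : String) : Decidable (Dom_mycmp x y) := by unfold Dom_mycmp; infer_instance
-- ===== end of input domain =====

-- B replaces A's startswith branch cascade + builtin cmp with ONE char-by-char scan
-- over priority-tagged strings (alternative decomposition; same cost).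

-- ===== PORT A =====
def cmpStr (a : String) (b : String) : Int :=
  (if a > b then (1 : Int) else 0) - (if a < b then (1 : Int) else 0)

-- the 'for prefix in prioritized' loop with its early returns
def mycmpLoop (x : String) (y : String) : List String → Option Int
  | [] => none
  | p :: ps =>
    let xsw := PySem.Str.startswith x p
    let ysw := PySem.Str.startswith y p
    if xsw && ysw then some (cmpStr x y)
    else if xsw then some (-1)
    else if ysw then some 1
    else mycmpLoop x y ps

def prioritized : List String := ["INBOX"]

def mycmp (x : String) (y : String) : Int :=
  match mycmpLoop x y prioritized with
  | some r => r
  | none => cmpStr x y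

-- ===== PORT B =====
-- tag(s) = ('\x00' if s.startswith('INBOX') else '\x01') + s
def tagB (s : String) : List Char :=
  (if PySem.Str.startswith s "INBOX" then Char.ofNat 0 else Char.ofNat 1) :: s.toList

-- 'for ca, cb in zip(a, b): if ca != cb: return -1 if ca < cb else 1'
def scanB : List Char → List Char → Option Int
  | ca :: as_, cb :: bs => if ca ≠ cb then some (if ca < cb then -1 else 1) else scanB as_ bs
  | _, _ => none

def mycmp_alt (x : String) (y : String) : Int :=
  let a := tagB x
  let b := tagB y
  match scanB a b with
  | some r => r
  | none => (if a.length > b.length then (1 : Int) else 0) -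
            (if a.length < b.length then (1 : Int) else 0)

-- ===== PRECONDITION & SPEC =====
def Spec_mycmp (x : String) (y : String) (out : Int) : Prop := out = mycmp_alt x y
instance (x : String) (y : String) (out : Int) : Decidable (Spec_mycmp x y out) := by unfold Spec_mycmp; infer_instance

-- ===== CLAIM (what is proved, stated in full; the proofs are below) =====
def Claim_equal_mycmp : Prop := ∀ (x : String) (y : String), Dom_mycmp x y → Spec_mycmp x y (mycmp x y)

-- ===== LEMMAS AND PROOFS =====

-- the scan-plus-length-fallback equals Python's (a > b) - (a < b) on char lists
lemma scan_cmp (a b : List Char) :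
    (match scanB a b with
     | some r => r
     | none => (if a.length > b.length then (1 : Int) else 0) -
               (if a.length < b.length then (1 : Int) else 0))
    = (if b < a then (1 : Int) else 0) - (if a < b then (1 : Int) else 0) := by
  induction a generalizing b with
  | nil =>
    cases b <;> simp [scanB, List.not_lt_nil, List.nil_lt_cons]
  | cons ca as ih =>
    cases b with
    | nil => simp [scanB, List.not_lt_nil, List.nil_lt_cons]
    | cons cb bs =>
      by_cases h : ca = cb
      · subst h
        simpa [scanB, List.cons_lt_cons_iff, lt_irrefl] using ih bs
      · rcases lt_trichotomy ca cb with hlt | heq | hgt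
        · simp [scanB, h, hlt, List.cons_lt_cons_iff, lt_asymm hlt, Ne.symm h]
        · exact absurd heq h
        · simp [scanB, h, hgt, List.cons_lt_cons_iff, lt_asymm hgt]

lemma alt_cmp (x y : String) :
    mycmp_alt x y
    = (if tagB y < tagB x then (1 : Int) else 0) - (if tagB x < tagB y then (1 : Int) else 0) := by
  unfold mycmp_alt
  exact scan_cmp (tagB x) (tagB y)

-- ===== VERDICT (by name: the statement is the Claim_ definition above) =====
theorem mycmp_spec : Claim_equal_mycmp := by
  intro x y _
  unfold Spec_mycmp
  cases hx : PySem.Str.startswith x "INBOX" <;> cases hy : PySem.Str.startswith y "INBOX" <;>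
    simp at hx hy
  · -- neither starts with INBOX: both sides compare the strings themselves
    have hA : mycmp x y = cmpStr x y := by
      simp [mycmp, mycmpLoop, prioritized, hx, hy]
    rw [hA, alt_cmp]
    unfold tagB
    simp only [cmpStr, gt_iff_lt, String.lt_iff_toList_lt]
    simp [hx, hy]
  · -- only y starts with INBOX: A returns 1; B's scan decides on the tag chars
    have hA : mycmp x y = 1 := by
      simp [mycmp, mycmpLoop, prioritized, hx, hy]
    have hB : mycmp_alt x y = 1 := by
      unfold mycmp_alt tagB
      simp [PySem.Str.startswith_eq, hx, hy, scanB,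
        (by decide : ¬ Char.ofNat 1 < Char.ofNat 0),
        (by decide : Char.ofNat 1 ≠ Char.ofNat 0)]
    rw [hA, hB]
  · -- only x starts with INBOX: A returns -1; B's scan decides on the tag chars
    have hA : mycmp x y = -1 := by
      simp [mycmp, mycmpLoop, prioritized, hx, hy]
    have hB : mycmp_alt x y = -1 := by
      unfold mycmp_alt tagB
      simp [PySem.Str.startswith_eq, hx, hy, scanB,
        (by decide : Char.ofNat 0 < Char.ofNat 1),
        (by decide : Char.ofNat 0 ≠ Char.ofNat 1)]
    rw [hA, hB]
  · -- both start with INBOX: equal tags, both sides compare the strings themselves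
    have hA : mycmp x y = cmpStr x y := by
      simp [mycmp, mycmpLoop, prioritized, hx, hy]
    rw [hA, alt_cmp]
    unfold tagB
    simp only [cmpStr, gt_iff_lt, String.lt_iff_toList_lt]
    simp [hx, hy]
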